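-- pv_equiv track=rewrite | github.com/yinhaoyun/leetcode | Python/967.numbers_with_same_consecutive_differences.py | back_track_int
-- ===== SOURCE A (Python) =====
-- from typing import List
--
-- def back_track_int(N: int, K: int) -> List[int]:
--     if not N:
--         return []
--
--     result = []
--     def helper(index: int, cur: int, formed: int) -> None:
--         formed = formed * 10 + cur
--         if index == N - 1:
--             result.append(formed)
--             return
--         if cur - K >= 0:
--             helper(index + 1, cur - K, formed)
--         if K and cur + K < 10:
--             helper(index + 1, cur + K, formed)
--         return
--
--     for i in range(0 if N == 1 else 1, 10):
--         helper(0, i, 0)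
--     return result
-- ===== SOURCE B (Python) =====
-- def back_track_int(N, K):
--     if not N:
--         return []
--     frontier = [(d, d) for d in range(0 if N == 1 else 1, 10)]
--     for _ in range(N - 1):
--         if not frontier:
--             break
--         nxt = []
--         for num, d in frontier:
--             if d - K >= 0:
--                 nxt.append((num * 10 + d - K, d - K))
--             if K and d + K < 10:
--                 nxt.append((num * 10 + d + K, d + K))
--         frontier = nxt
--     return [num for num, _ in frontier]
-- ===== Notes on version B (the rewrite author's own statement) =====
-- stated objective: alternative
-- what changed: Replaces the nested-function DFS recursion with an iterative level-by-level (BFS) frontier of (number, last digit) pairs, extended N-1 times; the minus-before-plus child order reproduces the DFS output order exactly.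
-- outside the precondition, e.g. on back_track_int(-1, 10): A returns [], B returns [1, 2, 3, 4, 5, 6, 7, 8, 9]
import Mathlib
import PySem

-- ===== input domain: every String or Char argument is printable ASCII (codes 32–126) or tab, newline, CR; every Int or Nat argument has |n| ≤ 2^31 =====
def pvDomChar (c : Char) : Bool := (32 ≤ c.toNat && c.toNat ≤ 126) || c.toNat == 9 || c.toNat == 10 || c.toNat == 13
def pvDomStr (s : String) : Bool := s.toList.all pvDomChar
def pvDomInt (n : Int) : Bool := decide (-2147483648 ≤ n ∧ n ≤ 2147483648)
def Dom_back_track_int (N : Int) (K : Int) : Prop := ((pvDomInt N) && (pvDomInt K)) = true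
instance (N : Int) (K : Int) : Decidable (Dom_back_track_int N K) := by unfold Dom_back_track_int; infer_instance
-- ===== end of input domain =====

-- B replaces A's nested-function DFS recursion by an iterative level-by-level frontier
-- of (number, last digit) pairs (alternative decomposition, same output order).

-- ===== PORT A =====
-- A's inner `helper`, with fuel = (N-1) - index (the remaining depth): `index == N - 1` is fuel = 0.
def pvHelperA (K : Int) (fuel : Nat) (cur : Int) (formed : Int) (result : List Int) : List Int :=
  let formed := formed * 10 + cur
  match fuel with
  | 0 => result ++ [formed]
  | fuel + 1 =>
    let r1 := if cur - K ≥ 0 then pvHelperA K fuel (cur - K) formed result else result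
    if K ≠ 0 ∧ cur + K < 10 then pvHelperA K fuel (cur + K) formed r1 else r1

def back_track_int (N : Int) (K : Int) : List Int :=
  if N == 0 then []
  else
    (PySem.List.pyRange (if N == 1 then 0 else 1) 10 1).foldl
      (fun result i => pvHelperA K (N - 1).toNat i 0 result) []

-- ===== PORT B =====
-- one level of B's loop body: expand every (num, d) of the frontier, minus child first
def pvStepB (K : Int) (frontier : List (Int × Int)) : List (Int × Int) :=
  frontier.foldl
    (fun nxt p =>
      let nxt := if p.2 - K ≥ 0 then nxt ++ [(p.1 * 10 + p.2 - K, p.2 - K)] else nxt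
      if K ≠ 0 ∧ p.2 + K < 10 then nxt ++ [(p.1 * 10 + p.2 + K, p.2 + K)] else nxt) []

-- B's `for _ in range(N-1)` loop with the `if not frontier: break` early exit
def pvLoopB (K : Int) (fuel : Nat) (frontier : List (Int × Int)) : List (Int × Int) :=
  match fuel with
  | 0 => frontier
  | fuel + 1 => if frontier = [] then frontier else pvLoopB K fuel (pvStepB K frontier)

def back_track_int_alt (N : Int) (K : Int) : List Int :=
  if N == 0 then []
  else
    let init := (PySem.List.pyRange (if N == 1 then 0 else 1) 10 1).map (fun d => (d, d))
    (pvLoopB K (N - 1).toNat init).map (·.1)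

-- ===== PRECONDITION & SPEC =====
-- Pre_ excludes negative N (not a digit count): there A's helper recurses without bound
-- (RecursionError) whenever |K| < 10, and only accidentally returns [] when K ≥ 10.
def Pre_back_track_int (N : Int) (K : Int) : Prop := 0 ≤ N
instance (N : Int) (K : Int) : Decidable (Pre_back_track_int N K) := by unfold Pre_back_track_int; infer_instance
def pvWitness_back_track_int : Int × Int := (3, 2)

def Spec_back_track_int (N : Int) (K : Int) (out : List Int) : Prop := out = back_track_int_alt N K
instance (N : Int) (K : Int) (out : List Int) : Decidable (Spec_back_track_int N K out) := by unfold Spec_back_track_int; infer_instance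

-- ===== CLAIM (what is proved, stated in full; the proofs are below) =====
def Claim_equal_back_track_int : Prop := ∀ (N : Int) (K : Int), Dom_back_track_int N K → Pre_back_track_int N K → Spec_back_track_int N K (back_track_int N K)

-- ===== LEMMAS AND PROOFS =====

-- the leaves of the DFS subtree below a node with value v, last digit d and `fuel` levels to go
def pvLeaves (K : Int) (fuel : Nat) (v : Int) (d : Int) : List Int :=
  match fuel with
  | 0 => [v]
  | fuel + 1 =>
    (if d - K ≥ 0 then pvLeaves K fuel (v * 10 + (d - K)) (d - K) else []) ++
    (if K ≠ 0 ∧ d + K < 10 then pvLeaves K fuel (v * 10 + (d + K)) (d + K) else [])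

theorem pvHelperA_eq_leaves (K : Int) (fuel : Nat) :
    ∀ (cur formed : Int) (res : List Int),
      pvHelperA K fuel cur formed res = res ++ pvLeaves K fuel (formed * 10 + cur) cur := by
  induction fuel with
  | zero => intro cur formed res; simp [pvHelperA, pvLeaves]
  | succ n ih =>
    intro cur formed res
    simp only [pvHelperA, pvLeaves]
    split_ifs with h1 h2 h2 <;> simp [ih, List.append_assoc]

theorem pvStepB_eq_flatMap (K : Int) (fr : List (Int × Int)) :
    pvStepB K fr = fr.flatMap (fun p =>
      (if p.2 - K ≥ 0 then [(p.1 * 10 + (p.2 - K), p.2 - K)] else []) ++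
      (if K ≠ 0 ∧ p.2 + K < 10 then [(p.1 * 10 + (p.2 + K), p.2 + K)] else [])) := by
  have gen : ∀ (l : List (Int × Int)) (acc : List (Int × Int)),
      l.foldl (fun nxt p =>
        let nxt := if p.2 - K ≥ 0 then nxt ++ [(p.1 * 10 + p.2 - K, p.2 - K)] else nxt
        if K ≠ 0 ∧ p.2 + K < 10 then nxt ++ [(p.1 * 10 + p.2 + K, p.2 + K)] else nxt) acc
      = acc ++ l.flatMap (fun p =>
        (if p.2 - K ≥ 0 then [(p.1 * 10 + (p.2 - K), p.2 - K)] else []) ++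
        (if K ≠ 0 ∧ p.2 + K < 10 then [(p.1 * 10 + (p.2 + K), p.2 + K)] else [])) := by
    intro l
    induction l with
    | nil => intro acc; simp
    | cons p t ih =>
      intro acc
      simp only [List.foldl_cons, List.flatMap_cons, ih]
      split_ifs with h1 h2 h2 <;>
        simp [ih, List.append_assoc] <;> omega
  simpa [pvStepB] using gen fr []

theorem pvStepB_nil (K : Int) : pvStepB K [] = [] := rfl

theorem pvLoopB_eq_iterate (K : Int) : ∀ (fuel : Nat) (fr : List (Int × Int)),
    pvLoopB K fuel fr = (pvStepB K)^[fuel] fr := by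
  intro fuel
  induction fuel with
  | zero => intro fr; simp [pvLoopB]
  | succ n ih =>
    intro fr
    by_cases h : fr = []
    · subst h
      have hfix : ∀ m : Nat, (pvStepB K)^[m] ([] : List (Int × Int)) = [] := by
        intro m
        induction m with
        | zero => simp
        | succ m ihm => rw [Function.iterate_succ_apply, pvStepB_nil, ihm]
      simp [pvLoopB, hfix]
    · simp [pvLoopB, h, ih, Function.iterate_succ_apply]

theorem pvFlatten_map_single : ∀ (l : List (Int × Int)),
    (l.map (fun p => [p.1])).flatten = l.map (·.1) := by
  intro l; induction l with
  | nil => simp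
  | cons p t ih => simp [ih]

-- mapping fst over `fuel` frontier expansions collects exactly the DFS leaves of each seed
theorem pvFrontier_leaves (K : Int) (fuel : Nat) :
    ∀ (fr : List (Int × Int)),
      ((pvStepB K)^[fuel] fr).map (·.1)
        = fr.flatMap (fun p => pvLeaves K fuel p.1 p.2) := by
  induction fuel with
  | zero =>
    intro fr
    simp [pvLeaves, List.flatMap_def, pvFlatten_map_single]
  | succ n ih =>
    intro fr
    rw [Function.iterate_succ_apply, ih (pvStepB K fr)]
    rw [pvStepB_eq_flatMap, List.flatMap_assoc]
    congr 1
    funext p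
    simp only [pvLeaves]
    split_ifs with h1 h2 h2 <;> simp

theorem pvFold_seeds (K : Int) (fuel : Nat) (l : List Int) :
    ∀ (res : List Int),
      l.foldl (fun result i => pvHelperA K fuel i 0 result) res
        = res ++ l.flatMap (fun i => pvLeaves K fuel i i) := by
  induction l with
  | nil => intro res; simp
  | cons i t ih =>
    intro res
    simp only [List.foldl_cons, List.flatMap_cons, pvHelperA_eq_leaves]
    simp [ih, List.flatMap_def, List.append_assoc]

-- ===== VERDICT (by name: the statement is the Claim_ definition above) =====
theorem back_track_int_spec : Claim_equal_back_track_int := by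
  intro N K _ _
  unfold Spec_back_track_int back_track_int back_track_int_alt
  by_cases hN : N = 0
  · simp [hN]
  · have hbe : (N == 0) = false := by simp [hN]
    simp only [hbe, Bool.false_eq_true, if_false]
    rw [pvLoopB_eq_iterate, pvFrontier_leaves, pvFold_seeds, List.flatMap_map]
    simp
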